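-- pv_equiv track=rewrite | github.com/pypi-data/pypi-mirror-403 | packages/taskflows/taskflows-0.19.0.tar.gz/taskflows-0.19.0/taskflows/files/gsheets.py | _column_ranges
-- ===== SOURCE A (Python) =====
-- from typing import Any, Dict, List, Literal, Optional, Sequence, Tuple
--
-- def _column_ranges(
--     col_names: Sequence[str], columns: Sequence[str]
-- ) -> List[Tuple[int, int]]:
--     """Get index ranges of `col_names` in `columns`."""
--     if (not columns) or (not col_names):
--         return []
--     col_idxs = sorted([columns.index(c) for c in col_names])
--     ranges = []
--     start = col_idx = col_idxs[0]
--     for prev, col_idx in enumerate(col_idxs[1:]):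
--         prev_col_idx = col_idxs[prev]
--         if col_idx > (prev_col_idx + 1):
--             ranges.append((start, prev_col_idx + 1))
--             start = col_idx
--     ranges.append((start, col_idx + 1))
--     return ranges
-- ===== SOURCE B (Python) =====
-- def _column_ranges(col_names, columns):
--     """Get index ranges of `col_names` in `columns`."""
--     if (not columns) or (not col_names):
--         return []
--     idxs = sorted({columns.index(c) for c in col_names})
--     ranges = []
--     rest = idxs
--     while rest:
--         start = rest[0]
--         end, rest = start, rest[1:]
--         while rest and rest[0] == end + 1:
--             end, rest = rest[0], rest[1:]
--         ranges.append((start, end + 1))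
--     return ranges
-- ===== Notes on version B (the rewrite author's own statement) =====
-- stated objective: alternative
-- what changed: B dedupes the indices with a set, then emits ranges by directly scanning each maximal consecutive run (inner advance loop, no split-on-gap state machine and no trailing append), instead of A's single fold that carries start/prev state and appends on gaps.
import Mathlib
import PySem

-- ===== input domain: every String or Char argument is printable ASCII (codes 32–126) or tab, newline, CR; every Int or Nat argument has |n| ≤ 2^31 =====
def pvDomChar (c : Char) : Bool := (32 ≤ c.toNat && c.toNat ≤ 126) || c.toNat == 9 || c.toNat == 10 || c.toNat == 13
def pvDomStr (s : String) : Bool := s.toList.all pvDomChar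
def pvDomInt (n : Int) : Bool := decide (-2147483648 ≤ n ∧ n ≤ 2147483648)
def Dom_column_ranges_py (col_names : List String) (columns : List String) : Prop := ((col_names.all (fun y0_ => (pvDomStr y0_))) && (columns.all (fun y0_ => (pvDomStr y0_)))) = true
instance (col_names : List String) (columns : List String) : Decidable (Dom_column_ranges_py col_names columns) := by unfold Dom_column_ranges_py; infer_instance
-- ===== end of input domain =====

-- B dedupes the indices with a set and emits ranges by scanning maximal consecutive runs,
-- instead of A's gap-splitting fold with start/prev state; same cost, different decomposition.


-- ===== PORT A =====
-- columns.index(c): Pre_ guarantees membership (index? = some); Python raises ValueError otherwise.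
def column_ranges_py (col_names : List String) (columns : List String) : List (Int × Int) :=
  if columns = [] ∨ col_names = [] then []
  else
    let col_idxs : List Int :=
      PySem.List.sorted (col_names.map (fun c => (((PySem.List.index? columns c).getD 0 : Nat) : Int))) (fun x => x) false
    match col_idxs with
    | [] => []  -- unreachable: col_names ≠ []
    | x :: xs =>
      let st := xs.foldl (fun (st : List (Int × Int) × Int × Int) c =>
          if c > st.2.2 + 1 then (st.1 ++ [(st.2.1, st.2.2 + 1)], c, c)
          else (st.1, st.2.1, c)) ([], x, x)
      st.1 ++ [(st.2.1, st.2.2 + 1)]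

-- ===== PORT B =====
-- inner while: extend the current run while the next index is consecutive
def pvExtendRun : Int → List Int → Int × List Int
  | e, [] => (e, [])
  | e, y :: ys => if y = e + 1 then pvExtendRun y ys else (e, y :: ys)

theorem pvExtendRun_length (e : Int) (l : List Int) : (pvExtendRun e l).2.length ≤ l.length := by
  induction l generalizing e with
  | nil => simp [pvExtendRun]
  | cons y ys ih =>
    simp only [pvExtendRun]
    split
    · exact le_trans (ih y) (Nat.le_succ _)
    · simp

-- outer while: one maximal run per iteration
def pvRuns : List Int → List (Int × Int)
  | [] => []
  | x :: xs => (x, (pvExtendRun x xs).1 + 1) :: pvRuns (pvExtendRun x xs).2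
termination_by l => l.length
decreasing_by simpa using Nat.lt_succ_of_le (pvExtendRun_length x xs)

def column_ranges_py_alt (col_names : List String) (columns : List String) : List (Int × Int) :=
  if columns = [] ∨ col_names = [] then []
  else
    pvRuns (PySem.List.sorted
      (PySem.Set.ofList (col_names.map (fun c => (((PySem.List.index? columns c).getD 0 : Nat) : Int))))
      (fun x => x) false)

-- ===== PRECONDITION & SPEC =====
-- Pre_ excludes exactly the inputs on which Python A raises ValueError (both lists nonempty and
-- some name of col_names absent from columns); B raises the same ValueError there.
def Pre_column_ranges_py (col_names : List String) (columns : List String) : Prop :=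
  columns = [] ∨ col_names = [] ∨ ∀ c ∈ col_names, c ∈ columns
instance (col_names : List String) (columns : List String) : Decidable (Pre_column_ranges_py col_names columns) := by unfold Pre_column_ranges_py; infer_instance

def pvWitness_column_ranges_py : List String × List String := (["a", "b", "d"], ["a", "b", "c", "d"])

def Spec_column_ranges_py (col_names : List String) (columns : List String) (out : List (Int × Int)) : Prop := out = column_ranges_py_alt col_names columns
instance (col_names : List String) (columns : List String) (out : List (Int × Int)) : Decidable (Spec_column_ranges_py col_names columns out) := by unfold Spec_column_ranges_py; infer_instance

-- ===== CLAIM (what is proved, stated in full; the proofs are below) =====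
def Claim_equal_column_ranges_py : Prop := ∀ (col_names : List String) (columns : List String), Dom_column_ranges_py col_names columns → Pre_column_ranges_py col_names columns → Spec_column_ranges_py col_names columns (column_ranges_py col_names columns)

-- ===== LEMMAS AND PROOFS =====

-- A's loop body, as a recursion (accumulator factored out)
def aCore (start prev : Int) : List Int → List (Int × Int)
  | [] => [(start, prev + 1)]
  | c :: cs => if c > prev + 1 then (start, prev + 1) :: aCore c c cs else aCore start c cs

theorem foldA_eq_aCore (l : List Int) (r : List (Int × Int)) (start prev : Int) :
    (let st := l.foldl (fun (st : List (Int × Int) × Int × Int) c =>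
        if c > st.2.2 + 1 then (st.1 ++ [(st.2.1, st.2.2 + 1)], c, c)
        else (st.1, st.2.1, c)) (r, start, prev)
     st.1 ++ [(st.2.1, st.2.2 + 1)]) = r ++ aCore start prev l := by
  induction l generalizing r start prev with
  | nil => simp [aCore]
  | cons c cs ih =>
    simp only [List.foldl_cons, aCore]
    split
    · rw [ih]; simp
    · rw [ih]

-- destuttering a weakly increasing list (what duplicate indices reduce to)
def dd1 (p : Int) : List Int → List Int
  | [] => []
  | y :: ys => if y = p then dd1 p ys else y :: dd1 y ys

theorem dd1_subset (l : List Int) (p a : Int) (h : a ∈ dd1 p l) : a ∈ l := by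
  induction l generalizing p with
  | nil => simp [dd1] at h
  | cons y ys ih =>
    rw [dd1] at h
    split at h
    · exact List.mem_cons_of_mem _ (ih _ h)
    · rcases List.mem_cons.mp h with rfl | h
      · exact List.mem_cons_self
      · exact List.mem_cons_of_mem _ (ih _ h)

theorem aCore_dd1 (l : List Int) (start prev : Int)
    (h : List.Pairwise (· ≤ ·) (prev :: l)) :
    aCore start prev l = aCore start prev (dd1 prev l) := by
  induction l generalizing start prev with
  | nil => rfl
  | cons y ys ih =>
    have hyys : List.Pairwise (· ≤ ·) (y :: ys) := h.of_cons
    have hpys : List.Pairwise (· ≤ ·) (prev :: ys) :=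
      h.sublist ((List.sublist_cons_self y ys).cons₂ prev)
    by_cases hy : y = prev
    · subst hy
      rw [dd1, if_pos rfl, aCore, if_neg (by omega)]
      exact ih _ _ hpys
    · rw [dd1, if_neg hy]
      simp only [aCore]
      split
      · rw [ih _ _ hyys]
      · rw [ih _ _ hyys]

theorem dd1_pairwise_lt (l : List Int) (p : Int) (h : List.Pairwise (· ≤ ·) (p :: l)) :
    List.Pairwise (· < ·) (p :: dd1 p l) := by
  induction l generalizing p with
  | nil => simp [dd1]
  | cons y ys ih =>
    have hpy : p ≤ y := List.rel_of_pairwise_cons h List.mem_cons_self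
    have hyys : List.Pairwise (· ≤ ·) (y :: ys) := h.of_cons
    have hpys : List.Pairwise (· ≤ ·) (p :: ys) :=
      h.sublist ((List.sublist_cons_self y ys).cons₂ p)
    by_cases hy : y = p
    · subst hy
      rw [dd1, if_pos rfl]
      exact ih _ hpys
    · rw [dd1, if_neg hy]
      have hylt : List.Pairwise (· < ·) (y :: dd1 y ys) := ih _ hyys
      have hplt : p < y := lt_of_le_of_ne hpy (Ne.symm hy)
      refine List.pairwise_cons.mpr ⟨?_, hylt⟩
      intro z hz
      rcases List.mem_cons.mp hz with rfl | hz
      · exact hplt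
      · exact lt_of_lt_of_le hplt (List.rel_of_pairwise_cons hyys (dd1_subset _ _ _ hz))

theorem mem_dd1 (l : List Int) (p a : Int) (h : List.Pairwise (· ≤ ·) (p :: l)) :
    a ∈ dd1 p l ↔ a ∈ l ∧ p < a := by
  induction l generalizing p with
  | nil => simp [dd1]
  | cons y ys ih =>
    have hpy : p ≤ y := List.rel_of_pairwise_cons h List.mem_cons_self
    have hyys : List.Pairwise (· ≤ ·) (y :: ys) := h.of_cons
    have hpys : List.Pairwise (· ≤ ·) (p :: ys) :=
      h.sublist ((List.sublist_cons_self y ys).cons₂ p)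
    have hge : ∀ b ∈ ys, y ≤ b := fun b hb => List.rel_of_pairwise_cons hyys hb
    by_cases hy : y = p
    · subst hy
      rw [dd1, if_pos rfl, ih _ hpys]
      constructor
      · rintro ⟨ha, hlt⟩; exact ⟨List.mem_cons_of_mem _ ha, hlt⟩
      · rintro ⟨ha, hlt⟩
        rcases List.mem_cons.mp ha with rfl | h1
        · omega
        · exact ⟨h1, hlt⟩
    · have hpy' : p < y := lt_of_le_of_ne hpy (Ne.symm hy)
      rw [dd1, if_neg hy]
      simp only [List.mem_cons, ih _ hyys]
      constructor
      · rintro (rfl | ⟨ha, hlt⟩)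
        · exact ⟨Or.inl rfl, hpy'⟩
        · exact ⟨Or.inr ha, lt_trans hpy' hlt⟩
      · rintro ⟨rfl | ha, hlt⟩
        · exact Or.inl rfl
        · rcases lt_or_eq_of_le (hge a ha) with h1 | h1
          · exact Or.inr ⟨ha, h1⟩
          · exact Or.inl h1.symm

theorem aCore_eq_runs (l : List Int) (start prev : Int)
    (h : List.Pairwise (· < ·) (prev :: l)) :
    aCore start prev l = (start, (pvExtendRun prev l).1 + 1) :: pvRuns (pvExtendRun prev l).2 := by
  induction l generalizing start prev with
  | nil => simp [aCore, pvExtendRun, pvRuns]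
  | cons y ys ih =>
    have hpy : prev < y := List.rel_of_pairwise_cons h List.mem_cons_self
    have hyys : List.Pairwise (· < ·) (y :: ys) := h.of_cons
    by_cases hc : y = prev + 1
    · rw [aCore, if_neg (by omega), pvExtendRun, if_pos hc]
      subst hc
      exact ih _ _ hyys
    · have hgt : y > prev + 1 := by omega
      rw [aCore, if_pos hgt, pvExtendRun, if_neg hc]
      rw [pvRuns, ih _ _ hyys]

-- main bridge: A's fold result on a weakly sorted list = B's run scan on its destuttering
theorem aCore_eq_runs_dd (x : Int) (xs : List Int)
    (h : List.Pairwise (· ≤ ·) (x :: xs)) :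
    aCore x x xs = pvRuns (x :: dd1 x xs) := by
  rw [aCore_dd1 xs x x h, pvRuns, aCore_eq_runs _ _ _ (dd1_pairwise_lt xs x h)]

-- ===== VERDICT (by name: the statement is the Claim_ definition above) =====
theorem column_ranges_py_spec : Claim_equal_column_ranges_py := by
  intro col_names columns _hdom _hpre
  unfold Spec_column_ranges_py column_ranges_py column_ranges_py_alt
  by_cases hguard : columns = [] ∨ col_names = []
  · simp [hguard]
  · rw [if_neg hguard, if_neg hguard]
    push Not at hguard
    set m : List Int := col_names.map (fun c => (((PySem.List.index? columns c).getD 0 : Nat) : Int)) with hm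
    have hmne : m ≠ [] := by
      simp [hm, hguard.2]
    rcases hs : PySem.List.sorted m (fun x => x) false with _ | ⟨x, xs⟩
    · exact absurd ((PySem.List.sorted_eq_nil_iff m (fun x => x) false).mp hs) hmne
    · simp only []
      rw [foldA_eq_aCore, List.nil_append]
      have hpw : (x :: xs).Pairwise (· ≤ ·) := by
        have := PySem.List.sorted_pairwise m (fun x => x)
        rwa [hs] at this
      rw [aCore_eq_runs_dd x xs hpw]
      congr 1
      have hlt : (x :: dd1 x xs).Pairwise (· < ·) := dd1_pairwise_lt xs x hpw
      have hnd1 : (x :: dd1 x xs).Nodup := hlt.imp (fun h => ne_of_lt h)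
      have hge : ∀ b ∈ xs, x ≤ b := fun b hb => List.rel_of_pairwise_cons hpw hb
      have hmem : ∀ a, a ∈ x :: dd1 x xs ↔ a ∈ PySem.Set.ofList m := by
        intro a
        rw [PySem.Set.mem_ofList]
        have hms : a ∈ m ↔ a ∈ x :: xs := by
          rw [← hs, PySem.List.mem_sorted]
        rw [hms, List.mem_cons, List.mem_cons, mem_dd1 xs x a hpw]
        constructor
        · rintro (rfl | ⟨ha, _⟩)
          · exact Or.inl rfl
          · exact Or.inr ha
        · rintro (rfl | ha)
          · exact Or.inl rfl
          · rcases lt_or_eq_of_le (hge a ha) with h1 | h1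
            · exact Or.inr ⟨ha, h1⟩
            · exact Or.inl h1.symm
      have hperm : (x :: dd1 x xs).Perm (PySem.Set.ofList m) := by
        apply List.perm_of_nodup_nodup_toFinset_eq hnd1 (PySem.Set.nodup_ofList m)
        ext a
        simp only [List.mem_toFinset]
        exact hmem a
      exact (PySem.List.sorted_eq_of_perm_of_pairwise_lt (PySem.Set.ofList m) (x :: dd1 x xs) (fun x => x) hperm hlt).symm
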